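-- pv_equiv track=rewrite | github.com/renhe2021/R | backend/app/agent/tools.py | _overall_sentiment
-- ===== SOURCE A (Python) =====
-- def _overall_sentiment(articles: list) -> str:
--     if not articles:
--         return "unknown"
--     sentiments = [a["sentiment"] for a in articles]
--     pos = sentiments.count("positive")
--     neg = sentiments.count("negative")
--     if pos > neg:
--         return "positive"
--     elif neg > pos:
--         return "negative"
--     return "neutral"
-- ===== SOURCE B (Python) =====
-- def _overall_sentiment(articles: list) -> str:
--     if not articles:
--         return "unknown"
--     # Pair-cancellation: the stack only ever holds copies of one sentiment;
--     # an opposite sentiment cancels one of them (pop), a like one is pushed.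
--     # Each cancellation removes one "positive" and one "negative", so the
--     # surviving stack's label (if any) is the strict majority side.
--     stack = []
--     for a in articles:
--         s = a["sentiment"]
--         if s == "positive" or s == "negative":
--             if stack and stack[-1] != s:
--                 stack.pop()
--             else:
--                 stack.append(s)
--     if not stack:
--         return "neutral"
--     return stack[-1]
-- ===== Notes on version B (the rewrite author's own statement) =====
-- stated objective: alternative
-- what changed: Replaces list-building plus two .count passes and a comparison with a single-pass pair-cancellation stack: opposite sentiments cancel each other, so the surviving stack's label (or emptiness) directly gives the majority without ever computing the two counts.
import Mathlib
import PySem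

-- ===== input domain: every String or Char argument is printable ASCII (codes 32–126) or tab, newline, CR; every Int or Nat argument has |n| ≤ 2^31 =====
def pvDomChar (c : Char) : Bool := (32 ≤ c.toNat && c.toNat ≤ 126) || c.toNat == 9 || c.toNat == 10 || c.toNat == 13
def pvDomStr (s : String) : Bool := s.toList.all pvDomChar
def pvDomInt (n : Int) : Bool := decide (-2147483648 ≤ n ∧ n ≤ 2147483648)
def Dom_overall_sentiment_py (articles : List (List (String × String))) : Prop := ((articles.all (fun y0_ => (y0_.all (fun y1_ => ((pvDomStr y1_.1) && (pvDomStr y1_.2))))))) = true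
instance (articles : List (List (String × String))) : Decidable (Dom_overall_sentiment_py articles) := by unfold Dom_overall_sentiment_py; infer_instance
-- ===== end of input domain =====

-- B replaces the sentiments-list-plus-two-counts computation with a single-pass pair-cancellation stack
-- (opposite sentiments cancel; the surviving label is the majority); objective: alternative.
-- Pre_ excludes inputs on which Python A raises KeyError (an article without a "sentiment" key); B raises there too.


-- ===== PORT A =====
-- a["sentiment"]: Python raises KeyError on a missing key; Pre_ excludes that, the getD "" is never reached there
def pvSent (a : List (String × String)) : String := ((PySem.Dict.mk a).get? "sentiment").getD ""

def overall_sentiment_py (articles : List (List (String × String))) : String :=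
  if articles = [] then "unknown"
  else
    let sentiments := articles.map pvSent
    let pos := PySem.List.count sentiments "positive"
    let neg := PySem.List.count sentiments "negative"
    if pos > neg then "positive"
    else if neg > pos then "negative"
    else "neutral"

-- ===== PORT B =====
-- the Python stack appends/pops/inspects at the END; the Lean list stack does so at the HEAD (same stack discipline)
def pvStep (st : List String) (a : List (String × String)) : List String :=
  let s := pvSent a
  if s = "positive" || s = "negative" then
    match st with
    | t :: rest => if t ≠ s then rest else s :: t :: rest
    | [] => [s]
  else st

def overall_sentiment_py_alt (articles : List (List (String × String))) : String :=
  if articles = [] then "unknown"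
  else
    match articles.foldl pvStep [] with
    | [] => "neutral"
    | t :: _ => t

-- ===== PRECONDITION & SPEC =====
-- Pre_ excludes exactly the inputs on which Python's a["sentiment"] raises KeyError
def Pre_overall_sentiment_py (articles : List (List (String × String))) : Prop :=
  articles.all (fun a => ((PySem.Dict.mk a).get? "sentiment").isSome) = true
instance (articles : List (List (String × String))) : Decidable (Pre_overall_sentiment_py articles) := by unfold Pre_overall_sentiment_py; infer_instance

def pvWitness_overall_sentiment_py : (List (List (String × String))) :=
  [[("sentiment", "positive")], [("sentiment", "negative")], [("sentiment", "positive")]]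

def Spec_overall_sentiment_py (articles : List (List (String × String))) (out : String) : Prop := out = overall_sentiment_py_alt articles
instance (articles : List (List (String × String))) (out : String) : Decidable (Spec_overall_sentiment_py articles out) := by unfold Spec_overall_sentiment_py; infer_instance

-- ===== CLAIM (what is proved, stated in full; the proofs are below) =====
def Claim_equal_overall_sentiment_py : Prop := ∀ (articles : List (List (String × String))), Dom_overall_sentiment_py articles → Pre_overall_sentiment_py articles → Spec_overall_sentiment_py articles (overall_sentiment_py articles)

-- ===== LEMMAS AND PROOFS =====

-- abstract value of a homogeneous stack: k > 0 ↔ k copies of "positive", k < 0 ↔ -k copies of "negative"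
def pvEnc (k : Int) : List String :=
  if 0 ≤ k then List.replicate k.toNat "positive" else List.replicate (-k).toNat "negative"

def pvDelta (a : List (String × String)) : Int :=
  if pvSent a = "positive" then 1 else if pvSent a = "negative" then -1 else 0

theorem pvEnc_pos (n : Nat) : pvEnc (n : Int) = List.replicate n "positive" := by
  simp [pvEnc]

theorem pvEnc_neg (n : Nat) : pvEnc (-(n : Int)) = List.replicate n "negative" := by
  cases n with
  | zero => simp [pvEnc]
  | succ m =>
    have h1 : ¬ (0:Int) ≤ -((m+1 : Nat) : Int) := by omega
    have h2 : (-(-((m+1 : Nat) : Int))).toNat = m + 1 := by omega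
    simp only [pvEnc, h1, if_false, h2]

theorem pvStep_enc (k : Int) (a : List (String × String)) :
    pvStep (pvEnc k) a = pvEnc (k + pvDelta a) := by
  unfold pvDelta
  by_cases hp : pvSent a = "positive"
  · rw [if_pos hp]
    by_cases hk : 0 ≤ k
    · obtain ⟨n, rfl⟩ : ∃ n : Nat, k = n := ⟨k.toNat, by omega⟩
      have h2 : ((n:Int)+1) = ((n+1 : Nat) : Int) := by push_cast; ring
      rw [pvEnc_pos, h2, pvEnc_pos]
      unfold pvStep
      cases n <;> simp [hp, List.replicate_succ]
    · obtain ⟨n, rfl⟩ : ∃ n : Nat, k = -((n:Int)+1) := ⟨(-k-1).toNat, by omega⟩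
      have h2 : -((n:Int)+1) = -((n+1 : Nat) : Int) := by push_cast; ring
      have h3 : -((n:Int)+1)+1 = -((n : Nat) : Int) := by omega
      rw [h3, h2, pvEnc_neg, pvEnc_neg]
      unfold pvStep
      simp [hp, List.replicate_succ,
        (by decide : ("negative" : String) ≠ "positive")]
  · by_cases hq : pvSent a = "negative"
    · rw [if_neg hp, if_pos hq]
      by_cases hk : k ≤ 0
      · obtain ⟨n, rfl⟩ : ∃ n : Nat, k = -(n:Int) := ⟨(-k).toNat, by omega⟩
        have h2 : -(n:Int) + (-1) = -((n+1 : Nat) : Int) := by push_cast; ring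
        rw [pvEnc_neg, h2, pvEnc_neg]
        unfold pvStep
        cases n <;> simp [hq, List.replicate_succ]
      · obtain ⟨n, rfl⟩ : ∃ n : Nat, k = (n:Int)+1 := ⟨(k-1).toNat, by omega⟩
        have h2 : ((n:Int)+1) = ((n+1 : Nat) : Int) := by push_cast; ring
        have h3 : ((n:Int)+1) + (-1) = ((n : Nat) : Int) := by omega
        rw [h3, h2, pvEnc_pos, pvEnc_pos]
        unfold pvStep
        simp [hq, List.replicate_succ,
          (by decide : ("positive" : String) ≠ "negative")]
    · rw [if_neg hp, if_neg hq, add_zero]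
      unfold pvStep
      simp [hp, hq]

theorem pvFold_enc (l : List (List (String × String))) (k : Int) :
    l.foldl pvStep (pvEnc k) = pvEnc (k + (l.map pvDelta).sum) := by
  induction l generalizing k with
  | nil => simp
  | cons a t ih =>
    simp only [List.foldl_cons, pvStep_enc, ih, List.map_cons, List.sum_cons]
    ring_nf

theorem pvDelta_sum_eq (l : List (List (String × String))) :
    (l.map pvDelta).sum
      = (PySem.List.count (l.map pvSent) "positive" : Int)
        - (PySem.List.count (l.map pvSent) "negative" : Int) := by
  induction l with
  | nil => simp [PySem.List.count]
  | cons a t ih =>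
    simp only [List.map_cons, List.sum_cons, ih, PySem.List.count_eq, List.count_cons, pvDelta]
    by_cases hp : pvSent a = "positive" <;> by_cases hq : pvSent a = "negative" <;>
      simp_all <;> ring

-- ===== VERDICT (by name: the statement is the Claim_ definition above) =====
theorem overall_sentiment_py_spec : Claim_equal_overall_sentiment_py := by
  intro articles _ _
  unfold Spec_overall_sentiment_py overall_sentiment_py overall_sentiment_py_alt
  by_cases h : articles = []
  · simp [h]
  · simp only [h, if_false]
    have he : ([] : List String) = pvEnc 0 := by simp [pvEnc]
    rw [he, pvFold_enc, pvDelta_sum_eq, zero_add]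
    set p := PySem.List.count (articles.map pvSent) "positive" with hp
    set q := PySem.List.count (articles.map pvSent) "negative" with hq
    by_cases h1 : p > q
    · have e1 : ((p:Int) - q) = ((p - q : Nat) : Int) := by omega
      rw [if_pos h1, e1, pvEnc_pos]
      obtain ⟨m, hm⟩ : ∃ m, p - q = m + 1 := ⟨p - q - 1, by omega⟩
      rw [hm, List.replicate_succ]
    · by_cases h2 : q > p
      · have e1 : ((p:Int) - q) = -((q - p : Nat) : Int) := by omega
        rw [if_neg h1, if_pos h2, e1, pvEnc_neg]
        obtain ⟨m, hm⟩ : ∃ m, q - p = m + 1 := ⟨q - p - 1, by omega⟩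
        rw [hm, List.replicate_succ]
      · have e1 : ((p:Int) - q) = ((0 : Nat) : Int) := by omega
        rw [if_neg h1, if_neg h2, e1, pvEnc_pos, List.replicate]
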